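-- pv_equiv track=rewrite | github.com/BKBetz/Structured_programming | opdracht_mastermind/create_func.py | create_feedback
-- ===== SOURCE A (Python) =====
-- def create_feedback(code, guess):
--     feedback = [0, 0]
--     lst = []
--
--     # this one checks if the numbers are in the same spot
--     for i in range(0, 4):
--         if code[i] == guess[i]:
--             feedback[0] += 1
--             lst.append(guess[i])
--
--     # this checks if it is in the code
--     for i in range(0, 4):
--         if guess[i] in code:
--             num = guess[i]
--             guess_count = guess.count(num)
--             answer_count = code.count(num)
--
--             # if an numbers appears more in answer than in the list and it appears more in guess than in the list
--             # only then can u can increase the feedback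
--             if lst.count(guess[i]) < guess_count and lst.count(guess[i]) < answer_count:
--                 lst.append(num)
--                 feedback[1] += 1
--
--     feedback = [str(feedback[0]), str(feedback[1])]
--     return feedback
-- ===== SOURCE B (Python) =====
-- def create_feedback(code, guess):
--     board = range(4)
--     exact = sum(1 for i in board if code[i] == guess[i])
--     partial = 0
--     for v in set(guess[i] for i in board):
--         available = min(code.count(v), guess.count(v))
--         already = sum(1 for i in board if code[i] == guess[i] == v)
--         partial += min(sum(1 for i in board if guess[i] == v), available - already)
--     return [str(exact), str(partial)]
-- ===== Notes on version B (the rewrite author's own statement) =====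
-- stated objective: alternative
-- what changed: Replaces A's greedy simulation (a growing matched-pegs list with repeated .count/in tests inside the second positional loop) by a per-colour aggregate formula: for each distinct guessed colour, partial pegs = min(board occurrences of the colour, colour availability min(code.count, guess.count) minus its exact matches); Pre_ excludes only lists shorter than 4, on which both A and B raise IndexError.
import Mathlib
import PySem

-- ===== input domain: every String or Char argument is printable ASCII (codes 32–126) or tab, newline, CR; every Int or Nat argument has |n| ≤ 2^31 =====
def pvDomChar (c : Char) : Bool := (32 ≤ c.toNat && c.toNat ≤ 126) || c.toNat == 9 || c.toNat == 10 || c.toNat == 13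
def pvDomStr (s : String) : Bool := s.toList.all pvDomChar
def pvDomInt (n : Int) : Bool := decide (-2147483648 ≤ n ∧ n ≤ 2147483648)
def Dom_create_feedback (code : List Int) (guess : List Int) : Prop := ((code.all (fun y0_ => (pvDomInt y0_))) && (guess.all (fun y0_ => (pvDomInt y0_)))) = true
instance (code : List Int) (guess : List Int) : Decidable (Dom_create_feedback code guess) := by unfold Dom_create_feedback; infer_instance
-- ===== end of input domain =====

-- B replaces A's greedy matched-pegs-list simulation by a per-colour aggregate formula
-- (min of board occurrences and remaining colour availability) (objective: alternative).

-- ===== PORT A =====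
def create_feedback (code : List Int) (guess : List Int) : List String :=
  -- feedback = [0, 0]; lst = []
  let s1 := (PySem.List.pyRange 0 4 1).foldl
    (fun (st : Int × List Int) i =>
      if PySem.List.pyGetD code i 0 == PySem.List.pyGetD guess i 0 then
        (st.1 + 1, st.2 ++ [PySem.List.pyGetD guess i 0])
      else st) ((0 : Int), ([] : List Int))
  let s2 := (PySem.List.pyRange 0 4 1).foldl
    (fun (st : Int × List Int) i =>
      if code.contains (PySem.List.pyGetD guess i 0) then
        let num := PySem.List.pyGetD guess i 0
        let guess_count := PySem.List.count guess num
        let answer_count := PySem.List.count code num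
        if PySem.List.count st.2 num < guess_count ∧ PySem.List.count st.2 num < answer_count then
          (st.1 + 1, st.2 ++ [num])
        else st
      else st) ((0 : Int), s1.2)
  [PySem.Int.toStr s1.1, PySem.Int.toStr s2.1]

-- ===== PORT B =====
def create_feedback_alt (code : List Int) (guess : List Int) : List String :=
  let board := PySem.List.pyRange 0 4 1
  let exact := (board.map (fun i =>
    if PySem.List.pyGetD code i 0 == PySem.List.pyGetD guess i 0 then (1 : Int) else 0)).sum
  let colors := PySem.Set.ofList (board.map (fun i => PySem.List.pyGetD guess i 0))
  let part := colors.foldl (fun (acc : Int) v =>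
    let available := min (PySem.List.count code v) (PySem.List.count guess v)
    let already := (board.map (fun i =>
      if PySem.List.pyGetD code i 0 == PySem.List.pyGetD guess i 0
          && PySem.List.pyGetD guess i 0 == v then (1 : Int) else 0)).sum
    acc + min ((board.map (fun i =>
      if PySem.List.pyGetD guess i 0 == v then (1 : Int) else 0)).sum) (available - already)) 0
  [PySem.Int.toStr exact, PySem.Int.toStr part]

-- ===== PRECONDITION & SPEC =====
-- A indexes code[i] and guess[i] for i in range(4): it raises IndexError when either list is
-- shorter than 4 (B raises identically there); Pre_ excludes exactly those inputs.
def Pre_create_feedback (code : List Int) (guess : List Int) : Prop :=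
  4 ≤ code.length ∧ 4 ≤ guess.length
instance (code : List Int) (guess : List Int) : Decidable (Pre_create_feedback code guess) := by
  unfold Pre_create_feedback; infer_instance

def pvWitness_create_feedback : List Int × List Int := ([1, 2, 3, 4], [1, 3, 5, 3])

def Spec_create_feedback (code : List Int) (guess : List Int) (out : List String) : Prop := out = create_feedback_alt code guess
instance (code : List Int) (guess : List Int) (out : List String) : Decidable (Spec_create_feedback code guess out) := by unfold Spec_create_feedback; infer_instance

-- ===== CLAIM (what is proved, stated in full; the proofs are below) =====
def Claim_equal_create_feedback : Prop := ∀ (code : List Int) (guess : List Int), Dom_create_feedback code guess → Pre_create_feedback code guess → Spec_create_feedback code guess (create_feedback code guess)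

-- ===== LEMMAS AND PROOFS =====

-- min(code.count v, guess.count v), the cap on total pegs of value v.
def pvCap (code guess : List Int) (v : Int) : Int :=
  min ((code.count v : Int)) ((guess.count v : Int))

-- A's first loop over matched (code[i], guess[i]) pairs: counts the matches and appends the
-- matched guess values.
theorem pv_loopA1 (l : List (Int × Int)) (e : Int) (lst : List Int) :
    l.foldl (fun (st : Int × List Int) p =>
        if p.1 == p.2 then (st.1 + 1, st.2 ++ [p.2]) else st) (e, lst)
      = (e + ((l.filter (fun p => p.1 == p.2)).length : Int),
         lst ++ (l.filter (fun p => p.1 == p.2)).map Prod.snd) := by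
  induction l generalizing e lst with
  | nil => simp
  | cons h t ih =>
    by_cases hp : h.1 == h.2
    · rw [List.foldl_cons, if_pos hp, ih]
      simp only [List.filter_cons, hp, if_true, List.map_cons, List.length_cons, Prod.mk.injEq]
      constructor
      · push_cast; ring
      · simp
    · rw [List.foldl_cons, if_neg hp, ih]
      simp only [List.filter_cons, hp, if_false, Bool.false_eq_true]

-- A's second-loop body, rewritten: the membership and the two count tests amount to
-- "lst.count v < min(code.count v, guess.count v)".
theorem pv_stepA2 (code guess : List Int) (st : Int × List Int) (v : Int) :
    (if code.contains v then
        if PySem.List.count st.2 v < PySem.List.count guess v ∧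
           PySem.List.count st.2 v < PySem.List.count code v then
          (st.1 + 1, st.2 ++ [v])
        else st
      else st)
    = (if (st.2.count v : Int) < pvCap code guess v then (st.1 + 1, st.2 ++ [v]) else st) := by
  by_cases hc : code.contains v = true
  · simp only [hc, if_true, PySem.List.count_eq, pvCap]
    split_ifs with h1 h2 h2 <;> first | rfl | (exfalso; push_cast at h2 ⊢; omega)
  · have hcf : code.contains v = false := by simpa using hc
    have hnm : v ∉ code := by simpa using hc
    have h0 : code.count v = 0 := List.count_eq_zero.mpr hnm
    rw [hcf]
    simp only [Bool.false_eq_true, if_false, pvCap, h0]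
    rw [if_neg (by push_cast; omega)]

-- Invariant of A's greedy second loop: the partial counter it produces is the aggregate
-- min-of-multiplicities sum, for any finite superset F of the processed values.
theorem pv_loopA2 (code guess : List Int) (F : Finset Int) :
    ∀ (t : List Int), (∀ v ∈ t, v ∈ F) → ∀ (lst : List Int) (p : Int),
    (t.foldl (fun (st : Int × List Int) v =>
        if (st.2.count v : Int) < pvCap code guess v then (st.1 + 1, st.2 ++ [v]) else st)
      (p, lst)).1
    = p + ∑ w ∈ F, min ((t.count w : Int))
        (max 0 (pvCap code guess w - (lst.count w : Int))) := by
  intro t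
  induction t with
  | nil =>
    intro _ lst p
    simp only [List.foldl_nil, List.count_nil, Nat.cast_zero]
    rw [Finset.sum_eq_zero (fun w _ => by omega)]
    omega
  | cons v t ih =>
    intro hmem lst p
    have hvF : v ∈ F := hmem v (by simp)
    have hrest : ∀ w ∈ t, w ∈ F := fun w hw => hmem w (by simp [hw])
    by_cases h : (lst.count v : Int) < pvCap code guess v
    · simp only [List.foldl_cons, if_pos h]
      rw [ih hrest]
      rw [← Finset.add_sum_erase F
        (fun w => min ((t.count w : Int)) (max 0 (pvCap code guess w - ((lst ++ [v]).count w : Int)))) hvF,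
        ← Finset.add_sum_erase F
        (fun w => min (((v :: t).count w : Int)) (max 0 (pvCap code guess w - (lst.count w : Int)))) hvF]
      have hterm : min (((v :: t).count v : Int)) (max 0 (pvCap code guess v - (lst.count v : Int)))
          = 1 + min ((t.count v : Int)) (max 0 (pvCap code guess v - (((lst ++ [v]).count v : Int)))) := by
        simp [List.count_append]
        omega
      have hrest' : ∑ w ∈ F.erase v, min (((v :: t).count w : Int))
            (max 0 (pvCap code guess w - (lst.count w : Int)))
          = ∑ w ∈ F.erase v, min ((t.count w : Int))
            (max 0 (pvCap code guess w - ((lst ++ [v]).count w : Int))) := by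
        refine Finset.sum_congr rfl (fun w hw => ?_)
        have hne : w ≠ v := Finset.ne_of_mem_erase hw
        simp [List.count_append, Ne.symm hne]
      rw [hterm, hrest']
      ring
    · simp only [List.foldl_cons, if_neg h]
      rw [ih hrest]
      congr 1
      rw [← Finset.add_sum_erase F
        (fun w => min ((t.count w : Int)) (max 0 (pvCap code guess w - (lst.count w : Int)))) hvF,
        ← Finset.add_sum_erase F
        (fun w => min (((v :: t).count w : Int)) (max 0 (pvCap code guess w - (lst.count w : Int)))) hvF]
      have hterm : min (((v :: t).count v : Int)) (max 0 (pvCap code guess v - (lst.count v : Int)))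
          = min ((t.count v : Int)) (max 0 (pvCap code guess v - (lst.count v : Int))) := by
        simp
        omega
      have hrest' : ∑ w ∈ F.erase v, min (((v :: t).count w : Int))
            (max 0 (pvCap code guess w - (lst.count w : Int)))
          = ∑ w ∈ F.erase v, min ((t.count w : Int))
            (max 0 (pvCap code guess w - (lst.count w : Int))) := by
        refine Finset.sum_congr rfl (fun w hw => ?_)
        simp [Ne.symm (Finset.ne_of_mem_erase hw)]
      rw [hterm, hrest']

-- The matched-guess-values list: its count of a value is at most each side's multiplicity.
theorem pv_lst_le (l : List (Int × Int)) (w : Int) :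
    ((l.filter (fun p => p.1 == p.2)).map Prod.snd).count w ≤ (l.map Prod.fst).count w ∧
    ((l.filter (fun p => p.1 == p.2)).map Prod.snd).count w ≤ (l.map Prod.snd).count w := by
  constructor
  · have hmap : (l.filter (fun p => p.1 == p.2)).map Prod.snd
        = (l.filter (fun p => p.1 == p.2)).map Prod.fst :=
      List.map_congr_left (fun p hp => (beq_iff_eq.mp ((List.mem_filter.mp hp).2)).symm)
    rw [hmap]
    exact (List.Sublist.map Prod.fst l.filter_sublist).count_le w
  · exact (List.Sublist.map Prod.snd l.filter_sublist).count_le w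

-- A 0/1 indicator sum over pairs is the number of matching pairs.
theorem pv_indsum1 (l : List (Int × Int)) :
    (l.map (fun p => if p.1 == p.2 then (1 : Int) else 0)).sum
      = ((l.filter (fun p => p.1 == p.2)).length : Int) := by
  induction l with
  | nil => simp
  | cons h t ih =>
    by_cases hp : h.1 == h.2
    · rw [List.map_cons, List.sum_cons, if_pos hp, ih]
      simp only [List.filter_cons, hp, if_true, List.length_cons]
      push_cast; ring
    · rw [List.map_cons, List.sum_cons, if_neg hp, ih]
      simp only [List.filter_cons, hp, Bool.false_eq_true, if_false]
      ring

-- A 0/1 indicator sum over a list is the count of the value.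
theorem pv_indsum_eq (xs : List Int) (v : Int) :
    (xs.map (fun x => if x == v then (1 : Int) else 0)).sum = ((xs.count v : Int)) := by
  induction xs with
  | nil => simp
  | cons x t ih =>
    by_cases hx : x == v
    · rw [List.map_cons, List.sum_cons, if_pos hx, ih, List.count_cons, if_pos hx]
      push_cast; ring
    · rw [List.map_cons, List.sum_cons, if_neg hx, ih, List.count_cons, if_neg hx]
      push_cast; ring

-- A 0/1 indicator sum over pairs matching with value v is that value's count among the
-- matched guess values.
theorem pv_indsum2 (l : List (Int × Int)) (v : Int) :
    (l.map (fun p => if p.1 == p.2 && p.2 == v then (1 : Int) else 0)).sum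
      = ((((l.filter (fun p => p.1 == p.2)).map Prod.snd).count v : Int)) := by
  induction l with
  | nil => simp
  | cons h t ih =>
    by_cases hp : h.1 == h.2
    · by_cases hv : h.2 == v
      · rw [List.map_cons, List.sum_cons, if_pos (by simp [hp, hv]), ih]
        simp only [List.filter_cons, hp, if_true, List.map_cons, List.count_cons, hv]
        push_cast; ring
      · rw [List.map_cons, List.sum_cons, if_neg (by simp [hp, hv]), ih]
        simp only [List.filter_cons, hp, if_true, List.map_cons, List.count_cons, hv,
          Bool.false_eq_true, if_false]
        push_cast; ring
    · rw [List.map_cons, List.sum_cons, if_neg (by simp [hp]), ih]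
      simp only [List.filter_cons, hp, Bool.false_eq_true, if_false]
      ring

-- The index loops over range(4), rephrased as loops over the four leading (code, guess) values.
theorem pv_A1 (c0 c1 c2 c3 : Int) (cr : List Int) (g0 g1 g2 g3 : Int) (gr : List Int)
    (init : Int × List Int) :
    (PySem.List.pyRange 0 4 1).foldl
      (fun (st : Int × List Int) i =>
        if PySem.List.pyGetD (c0::c1::c2::c3::cr) i 0 == PySem.List.pyGetD (g0::g1::g2::g3::gr) i 0 then
          (st.1 + 1, st.2 ++ [PySem.List.pyGetD (g0::g1::g2::g3::gr) i 0])
        else st) init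
    = [(c0,g0),(c1,g1),(c2,g2),(c3,g3)].foldl
      (fun (st : Int × List Int) p => if p.1 == p.2 then (st.1 + 1, st.2 ++ [p.2]) else st) init := by
  have hR : PySem.List.pyRange (0:Int) 4 1 = [0,1,2,3] := by decide
  rw [hR]
  simp only [List.foldl_cons, List.foldl_nil, PySem.List.pyGetD_ofNat']
  norm_num

theorem pv_A2 (code : List Int) (g0 g1 g2 g3 : Int) (gr : List Int) (init : Int × List Int) :
    (PySem.List.pyRange 0 4 1).foldl
      (fun (st : Int × List Int) i =>
        if code.contains (PySem.List.pyGetD (g0::g1::g2::g3::gr) i 0) then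
          let num := PySem.List.pyGetD (g0::g1::g2::g3::gr) i 0
          let guess_count := PySem.List.count (g0::g1::g2::g3::gr) num
          let answer_count := PySem.List.count code num
          if PySem.List.count st.2 num < guess_count ∧ PySem.List.count st.2 num < answer_count then
            (st.1 + 1, st.2 ++ [num])
          else st
        else st) init
    = [g0,g1,g2,g3].foldl
      (fun (st : Int × List Int) v =>
        if code.contains v then
          if PySem.List.count st.2 v < PySem.List.count (g0::g1::g2::g3::gr) v ∧
             PySem.List.count st.2 v < PySem.List.count code v then
            (st.1 + 1, st.2 ++ [v])
          else st
        else st) init := by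
  have hR : PySem.List.pyRange (0:Int) 4 1 = [0,1,2,3] := by decide
  rw [hR]
  simp only [List.foldl_cons, List.foldl_nil, PySem.List.pyGetD_ofNat']
  norm_num

-- Both ports agree once the lists are exposed as four leading values plus a remainder.
set_option maxHeartbeats 1600000 in
theorem pv_main (c0 c1 c2 c3 : Int) (cr : List Int) (g0 g1 g2 g3 : Int) (gr : List Int) :
    create_feedback (c0::c1::c2::c3::cr) (g0::g1::g2::g3::gr)
      = create_feedback_alt (c0::c1::c2::c3::cr) (g0::g1::g2::g3::gr) := by
  have hR : PySem.List.pyRange (0:Int) 4 1 = [0,1,2,3] := by decide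
  have hLc : ∀ w, ((([(c0,g0),(c1,g1),(c2,g2),(c3,g3)].filter
        (fun p => p.1 == p.2)).map Prod.snd).count w : Int)
      ≤ pvCap (c0::c1::c2::c3::cr) (g0::g1::g2::g3::gr) w := by
    intro w
    have h := pv_lst_le [(c0,g0),(c1,g1),(c2,g2),(c3,g3)] w
    have hfst : [(c0,g0),(c1,g1),(c2,g2),(c3,g3)].map Prod.fst = [c0,c1,c2,c3] := rfl
    have hsnd : [(c0,g0),(c1,g1),(c2,g2),(c3,g3)].map Prod.snd = [g0,g1,g2,g3] := rfl
    rw [hfst, hsnd] at h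
    have hc : (c0::c1::c2::c3::cr).count w = ([c0,c1,c2,c3] : List Int).count w + cr.count w := by
      rw [show (c0::c1::c2::c3::cr : List Int) = [c0,c1,c2,c3] ++ cr from rfl, List.count_append]
    have hg : (g0::g1::g2::g3::gr).count w = ([g0,g1,g2,g3] : List Int).count w + gr.count w := by
      rw [show (g0::g1::g2::g3::gr : List Int) = [g0,g1,g2,g3] ++ gr from rfl, List.count_append]
    unfold pvCap
    have h1 := h.1
    have h2 := h.2
    refine le_min ?_ ?_ <;> push_cast [hc, hg] <;> omega
  have hA : create_feedback (c0::c1::c2::c3::cr) (g0::g1::g2::g3::gr)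
      = [PySem.Int.toStr ((([(c0,g0),(c1,g1),(c2,g2),(c3,g3)].filter
            (fun p => p.1 == p.2)).length : Int)),
         PySem.Int.toStr (∑ w ∈ ([g0,g1,g2,g3] : List Int).toFinset,
           min ((([g0,g1,g2,g3] : List Int).count w : Int))
             (max 0 (pvCap (c0::c1::c2::c3::cr) (g0::g1::g2::g3::gr) w
               - ((([(c0,g0),(c1,g1),(c2,g2),(c3,g3)].filter
                    (fun p => p.1 == p.2)).map Prod.snd).count w : Int))))] := by
    have hbody := funext fun (st : Int × List Int) => funext fun v =>
      pv_stepA2 (c0::c1::c2::c3::cr) (g0::g1::g2::g3::gr) st v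
    simp only [create_feedback]
    rw [pv_A1, pv_loopA1, pv_A2, hbody,
        pv_loopA2 _ _ (([g0,g1,g2,g3] : List Int).toFinset) [g0,g1,g2,g3]
          (fun v hv => List.mem_toFinset.mpr hv)]
    simp only [List.nil_append, zero_add]
  have hB : create_feedback_alt (c0::c1::c2::c3::cr) (g0::g1::g2::g3::gr)
      = [PySem.Int.toStr ((([(c0,g0),(c1,g1),(c2,g2),(c3,g3)].filter
            (fun p => p.1 == p.2)).length : Int)),
         PySem.Int.toStr (∑ w ∈ ([g0,g1,g2,g3] : List Int).toFinset,
           min ((([g0,g1,g2,g3] : List Int).count w : Int))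
             (pvCap (c0::c1::c2::c3::cr) (g0::g1::g2::g3::gr) w
               - ((([(c0,g0),(c1,g1),(c2,g2),(c3,g3)].filter
                    (fun p => p.1 == p.2)).map Prod.snd).count w : Int)))] := by
    have hsum : ∀ f : Int → Int, ((PySem.Set.ofList ([g0,g1,g2,g3] : List Int)).map f).sum
        = ∑ w ∈ ([g0,g1,g2,g3] : List Int).toFinset, f w := by
      intro f
      have hfin : (PySem.Set.ofList ([g0,g1,g2,g3] : List Int)).toFinset
          = ([g0,g1,g2,g3] : List Int).toFinset := by
        ext x; simp [PySem.Set.mem_ofList]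
      rw [← List.sum_toFinset f (PySem.Set.nodup_ofList _), hfin]
    have hm1 : ([0,1,2,3] : List Int).map (fun i =>
        if PySem.List.pyGetD (c0::c1::c2::c3::cr) i 0
            == PySem.List.pyGetD (g0::g1::g2::g3::gr) i 0 then (1:Int) else 0)
        = [(c0,g0),(c1,g1),(c2,g2),(c3,g3)].map (fun p => if p.1 == p.2 then (1:Int) else 0) := by
      simp [PySem.List.pyGetD_ofNat']
    have hm2 : ([0,1,2,3] : List Int).map
        (fun i => PySem.List.pyGetD (g0::g1::g2::g3::gr) i 0) = [g0,g1,g2,g3] := by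
      simp [PySem.List.pyGetD_ofNat']
    simp only [create_feedback_alt]
    rw [hR, hm1, pv_indsum1, hm2, PySem.List.foldl_add, zero_add, hsum]
    refine congrArg₂ (fun a b => [a, b]) rfl (congrArg PySem.Int.toStr ?_)
    refine Finset.sum_congr rfl (fun w _ => ?_)
    have hm3 : ([0,1,2,3] : List Int).map (fun i =>
        if PySem.List.pyGetD (g0::g1::g2::g3::gr) i 0 == w then (1:Int) else 0)
        = [g0,g1,g2,g3].map (fun x => if x == w then (1:Int) else 0) := by
      simp [PySem.List.pyGetD_ofNat']
    have hm4 : ([0,1,2,3] : List Int).map (fun i =>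
        if PySem.List.pyGetD (c0::c1::c2::c3::cr) i 0
              == PySem.List.pyGetD (g0::g1::g2::g3::gr) i 0
            && PySem.List.pyGetD (g0::g1::g2::g3::gr) i 0 == w then (1:Int) else 0)
        = [(c0,g0),(c1,g1),(c2,g2),(c3,g3)].map
            (fun p => if p.1 == p.2 && p.2 == w then (1:Int) else 0) := by
      simp [PySem.List.pyGetD_ofNat']
    rw [hm3, pv_indsum_eq, hm4, pv_indsum2]
    simp only [PySem.List.count_eq, pvCap]
    push_cast
    ring
  rw [hA, hB]
  refine congrArg₂ (fun a b => [a, b]) rfl (congrArg PySem.Int.toStr ?_)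
  refine Finset.sum_congr rfl (fun w _ => ?_)
  rw [max_eq_right (sub_nonneg.mpr (hLc w))]

-- ===== VERDICT (by name: the statement is the Claim_ definition above) =====
theorem create_feedback_spec : Claim_equal_create_feedback := by
  intro code guess _ hpre
  obtain ⟨hc4, hg4⟩ := hpre
  unfold Spec_create_feedback
  rcases code with _ | ⟨c0, _ | ⟨c1, _ | ⟨c2, _ | ⟨c3, cr⟩⟩⟩⟩ <;>
    rcases guess with _ | ⟨g0, _ | ⟨g1, _ | ⟨g2, _ | ⟨g3, gr⟩⟩⟩⟩ <;>
    simp only [List.length_nil, List.length_cons] at hc4 hg4 <;>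
    first
      | omega
      | exact pv_main c0 c1 c2 c3 cr g0 g1 g2 g3 gr
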